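-- pv_equiv track=rewrite | github.com/daisyden/ai_for_validation | opencode/issue_triage/issue_analysis/generate_issue_report.py | generate_summary_section
-- ===== SOURCE A (Python) =====
-- def get_category_display_name(cat: str) -> str:
--     """Map category codes/names to display names."""
--     category_map = {
--         '1 - Distributed': 'Distributed',
--         '2 - TorchAO': 'TorchAO',
--         '3 - PT2E': 'PT2E',
--         '4 - Flash Attention/Transformer': 'Flash Attention / Transformer Related',
--         '5 - Sparse': 'Sparse Operations Related',
--         '6 - Inductor/Compilation': 'Inductor / Compilation Related',
--         '7 - Torch Runtime': 'Others',
--         '8 - Torch Operations': 'Others',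
--         '9 - Dtype/Precision': 'Dtype / Precision Related',
--         '10 - Feature Not Supported': 'Others',
--         '11 - Skip/No Test Exists': 'Others',
--         '12 - Others': 'Others',
--         'Distributed': 'Distributed',
--         'TorchAO': 'TorchAO',
--         'PT2E': 'PT2E',
--         'Flash Attention / Transformer': 'Flash Attention / Transformer Related',
--         'Flash Attention/Transformer': 'Flash Attention / Transformer Related',
--         'Sparse': 'Sparse Operations Related',
--         'Inductor/Compilation': 'Inductor / Compilation Related',
--         'Dtype/Precision': 'Dtype / Precision Related',
--     }
--     return category_map.get(cat, cat)
--
-- def generate_summary_section(issues: list) -> str: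
--     """Generate section 1: Summary."""
--     lines = []
--     lines.append('## <span id=\'1-summary\'>1. Summary</span>\n')
--
--     total = len(issues)
--     lines.append(f'**Total Issues: {total}**\n')
--
--     # Count by category using normalized display names
--     cat_counts = {}
--     for issue in issues:
--         raw_cat = issue.get('Category', 'unknown') or 'unknown'
--         cat = get_category_display_name(raw_cat)
--         cat_counts[cat] = cat_counts.get(cat, 0) + 1
--
--     lines.append('### <span id=\'category-summary\'>Issues by Category</span>\n')
--     lines.append('| Category | Count |')
--     lines.append('|----------|------:|')
--     for cat in sorted(cat_counts.keys()):
--         lines.append(f'| {cat} | {cat_counts[cat]} |')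
--
--     lines.append('')
--     return '\n'.join(lines)
-- ===== SOURCE B (Python) =====
-- from itertools import groupby
--
-- def get_category_display_name(cat: str) -> str:
--     """Map category codes/names to display names."""
--     category_map = {
--         '1 - Distributed': 'Distributed',
--         '2 - TorchAO': 'TorchAO',
--         '3 - PT2E': 'PT2E',
--         '4 - Flash Attention/Transformer': 'Flash Attention / Transformer Related',
--         '5 - Sparse': 'Sparse Operations Related',
--         '6 - Inductor/Compilation': 'Inductor / Compilation Related',
--         '7 - Torch Runtime': 'Others',
--         '8 - Torch Operations': 'Others',
--         '9 - Dtype/Precision': 'Dtype / Precision Related',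
--         '10 - Feature Not Supported': 'Others',
--         '11 - Skip/No Test Exists': 'Others',
--         '12 - Others': 'Others',
--         'Distributed': 'Distributed',
--         'TorchAO': 'TorchAO',
--         'PT2E': 'PT2E',
--         'Flash Attention / Transformer': 'Flash Attention / Transformer Related',
--         'Flash Attention/Transformer': 'Flash Attention / Transformer Related',
--         'Sparse': 'Sparse Operations Related',
--         'Inductor/Compilation': 'Inductor / Compilation Related',
--         'Dtype/Precision': 'Dtype / Precision Related',
--     }
--     return category_map.get(cat, cat)
--
-- def generate_summary_section(issues: list) -> str:
--     """Generate section 1: Summary (sort-then-group instead of dict counting)."""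
--     names = sorted(get_category_display_name(issue.get('Category', 'unknown') or 'unknown')
--                    for issue in issues)
--     rows = ''.join(f'| {name} | {len(list(grp))} |\n' for name, grp in groupby(names))
--     return (
--         "## <span id='1-summary'>1. Summary</span>\n\n"
--         f"**Total Issues: {len(issues)}**\n\n"
--         "### <span id='category-summary'>Issues by Category</span>\n\n"
--         "| Category | Count |\n"
--         "|----------|------:|\n"
--         + rows
--     )
-- ===== Notes on version B (the rewrite author's own statement) =====
-- stated objective: idiomatic
-- what changed: Replaces the dict-count-then-sort-keys pass with a sort-then-groupby pass: the normalized category names are computed in one comprehension, sorted, and consecutive equal names are grouped into rows, so no counting dict is built and no separate key sort is needed.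
import Mathlib
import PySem

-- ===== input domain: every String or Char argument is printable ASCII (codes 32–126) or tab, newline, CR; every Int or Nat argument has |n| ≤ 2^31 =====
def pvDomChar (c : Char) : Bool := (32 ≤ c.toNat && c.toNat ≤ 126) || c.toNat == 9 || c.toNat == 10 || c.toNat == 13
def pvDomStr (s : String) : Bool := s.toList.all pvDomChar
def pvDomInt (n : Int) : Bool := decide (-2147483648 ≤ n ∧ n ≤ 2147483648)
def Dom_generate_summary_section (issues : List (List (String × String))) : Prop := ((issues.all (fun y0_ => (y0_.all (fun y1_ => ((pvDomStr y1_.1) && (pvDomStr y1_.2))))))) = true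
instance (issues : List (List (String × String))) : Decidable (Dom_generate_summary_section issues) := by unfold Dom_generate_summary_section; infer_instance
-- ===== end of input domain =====

-- B replaces A's dict-count-then-sort-keys pass with a sort-then-group-consecutive pass (idiomatic; same cost).

-- ===== PORT A =====
-- shared module-level helper of both Pythons
def get_category_display_name (cat : String) : String :=
  (PySem.Dict.ofList [
    ("1 - Distributed", "Distributed"),
    ("2 - TorchAO", "TorchAO"),
    ("3 - PT2E", "PT2E"),
    ("4 - Flash Attention/Transformer", "Flash Attention / Transformer Related"),
    ("5 - Sparse", "Sparse Operations Related"),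
    ("6 - Inductor/Compilation", "Inductor / Compilation Related"),
    ("7 - Torch Runtime", "Others"),
    ("8 - Torch Operations", "Others"),
    ("9 - Dtype/Precision", "Dtype / Precision Related"),
    ("10 - Feature Not Supported", "Others"),
    ("11 - Skip/No Test Exists", "Others"),
    ("12 - Others", "Others"),
    ("Distributed", "Distributed"),
    ("TorchAO", "TorchAO"),
    ("PT2E", "PT2E"),
    ("Flash Attention / Transformer", "Flash Attention / Transformer Related"),
    ("Flash Attention/Transformer", "Flash Attention / Transformer Related"),
    ("Sparse", "Sparse Operations Related"),
    ("Inductor/Compilation", "Inductor / Compilation Related"),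
    ("Dtype/Precision", "Dtype / Precision Related")]).getD cat cat

-- issue.get('Category', 'unknown') or 'unknown'  ('' is the only falsy str)
def pvRawCat (issue : List (String × String)) : String :=
  let g := (PySem.Dict.mk issue).getD "Category" "unknown"
  if g = "" then "unknown" else g

def generate_summary_section (issues : List (List (String × String))) : String :=
  let lines : List String := []
  let lines := lines ++ ["## <span id='1-summary'>1. Summary</span>\n"]
  let total : Int := issues.length
  let lines := lines ++ ["**Total Issues: " ++ PySem.Int.toStr total ++ "**\n"]
  let cat_counts : PySem.Dict String Int := issues.foldl (fun d issue =>
      let cat := get_category_display_name (pvRawCat issue)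
      d.insert cat (d.getD cat 0 + 1)) PySem.Dict.empty
  let lines := lines ++ ["### <span id='category-summary'>Issues by Category</span>\n"]
  let lines := lines ++ ["| Category | Count |"]
  let lines := lines ++ ["|----------|------:|"]
  -- cat_counts[cat]: KeyError impossible (cat ∈ keys), ported as getD with default 0
  let lines := (PySem.List.sorted cat_counts.keys (fun x => x)).foldl (fun ls cat =>
      ls ++ ["| " ++ cat ++ " | " ++ PySem.Int.toStr (cat_counts.getD cat 0) ++ " |"]) lines
  let lines := lines ++ [""]
  PySem.Str.join "\n" lines

-- ===== PORT B =====
-- itertools.groupby on the sorted names: one (name, run length) pair per run of equal names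
def groupRuns (l : List String) : List (String × Int) :=
  match l with
  | [] => []
  | x :: xs =>
      (x, (xs.takeWhile (· == x)).length + 1) :: groupRuns (xs.dropWhile (· == x))
termination_by l.length
decreasing_by
  simp only [List.length_cons]
  exact Nat.lt_succ_of_le (List.length_dropWhile_le _ _)

def generate_summary_section_alt (issues : List (List (String × String))) : String :=
  let names := PySem.List.sorted
    (issues.map (fun issue => get_category_display_name (pvRawCat issue))) (fun x => x)
  let rows := PySem.Str.join ""
    ((groupRuns names).map (fun p => "| " ++ p.1 ++ " | " ++ PySem.Int.toStr p.2 ++ " |\n"))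
  "## <span id='1-summary'>1. Summary</span>\n\n**Total Issues: " ++ PySem.Int.toStr (issues.length : Int)
    ++ "**\n\n### <span id='category-summary'>Issues by Category</span>\n\n| Category | Count |\n|----------|------:|\n"
    ++ rows

-- ===== PRECONDITION & SPEC =====
def Spec_generate_summary_section (issues : List (List (String × String))) (out : String) : Prop := out = generate_summary_section_alt issues
instance (issues : List (List (String × String))) (out : String) : Decidable (Spec_generate_summary_section issues out) := by unfold Spec_generate_summary_section; infer_instance

-- ===== CLAIM (what is proved, stated in full; the proofs are below) =====
def Claim_equal_generate_summary_section : Prop := ∀ (issues : List (List (String × String))), Dom_generate_summary_section issues → Spec_generate_summary_section issues (generate_summary_section issues)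

-- ===== LEMMAS AND PROOFS =====

theorem chars_join_aux (rs : List (List Char)) :
    PySem.Chars.join ['\n'] (rs ++ [[]]) = PySem.Chars.join [] (rs.map (· ++ ['\n'])) := by
  induction rs with
  | nil => simp [PySem.Chars.join_singleton, PySem.Chars.join_nil]
  | cons r rs' ih =>
    cases rs' with
    | nil => simp [PySem.Chars.join_cons_cons, PySem.Chars.join_singleton]
    | cons r2 t =>
      simp only [List.cons_append, List.map_cons, PySem.Chars.join_cons_cons] at *
      simp [ih]

theorem join_nil_cons (a : List Char) (l : List (List Char)) :
    PySem.Chars.join [] (a :: l) = a ++ PySem.Chars.join [] l := by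
  cases l with
  | nil => simp [PySem.Chars.join_singleton, PySem.Chars.join_nil]
  | cons b t => simp [PySem.Chars.join_cons_cons]

theorem groupRuns_sorted (l : List String) (h : l.Pairwise (· ≤ ·)) :
    groupRuns l
      = (PySem.List.sorted (PySem.Set.ofList l) (fun x => x)).map
          (fun k => (k, (l.count k : Int))) := by
  induction l using groupRuns.induct with
  | case1 => simp [groupRuns]; decide
  | case2 x xs ih =>
    rw [List.pairwise_cons] at h
    obtain ⟨h1, h2⟩ := h
    set run := xs.takeWhile (· == x) with hrun
    set rest := xs.dropWhile (· == x) with hrest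
    have hxs : run ++ rest = xs := List.takeWhile_append_dropWhile
    have hrun_eq : ∀ y ∈ run, y = x := by
      intro y hy
      have := List.mem_takeWhile_imp hy
      simpa using this
    have hrest_sub : rest.Sublist xs := List.dropWhile_sublist _
    have hrest_pw : rest.Pairwise (· ≤ ·) := h2.sublist hrest_sub
    have hx_le_rest : ∀ y ∈ rest, x ≤ y := fun y hy => h1 y (hrest_sub.mem hy)
    have hx_notin : x ∉ rest := by
      intro hx
      rcases hr : (xs.dropWhile (· == x)) with _ | ⟨r0, rest'⟩
      · rw [← hrest] at hr; rw [hr] at hx; exact absurd hx (List.not_mem_nil)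
      · have hne : xs.dropWhile (· == x) ≠ [] := by rw [hr]; simp
        have hr0 := List.head_dropWhile_not (· == x) hne
        have hr0ne : (xs.dropWhile (· == x)).head hne ≠ x := by simpa using hr0
        have hhead : (xs.dropWhile (· == x)).head hne = r0 := by
          simp [hr]
        rw [hhead] at hr0ne
        rw [← hrest] at hr
        rw [hr] at hx
        rcases List.mem_cons.mp hx with h' | h'
        · exact hr0ne h'.symm
        · have hle : r0 ≤ x := (List.pairwise_cons.mp (hr ▸ hrest_pw)).1 x h'
          have hge : x ≤ r0 := hx_le_rest r0 (hr ▸ List.mem_cons_self)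
          exact hr0ne (le_antisymm hle hge)
    -- counts
    have hcount_x : ((x :: xs).count x : Int) = (run.length : Int) + 1 := by
      have hxc : xs.count x = run.length := by
        rw [← hxs, List.count_append]
        have h3 : run.count x = run.length := List.count_eq_length.mpr (by
          intro y hy; simp [hrun_eq y hy])
        rw [h3, List.count_eq_zero.mpr hx_notin]
        omega
      simp [hxc]
    have hcount_rest : ∀ k ∈ rest, (x :: xs).count k = rest.count k := by
      intro k hk
      have hkx : k ≠ x := fun e => hx_notin (e ▸ hk)
      rw [← hxs]
      simp [List.count_append, Ne.symm hkx,
        List.count_eq_zero.mpr (fun hkr => hkx (hrun_eq k hkr))]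
    -- sorted-set decomposition
    have hsortrest := PySem.List.sorted_ofList_pairwise_lt (xs := rest)
    have hmem_sr : ∀ y, (y ∈ PySem.List.sorted (PySem.Set.ofList rest) (fun x => x)) ↔ y ∈ rest := by
      intro y
      rw [PySem.List.mem_sorted, PySem.Set.mem_ofList]
    have hnodup_sr : (PySem.List.sorted (PySem.Set.ofList rest) (fun x => x)).Nodup :=
      ((PySem.List.sorted_perm _ _ _).nodup_iff).mpr (PySem.Set.nodup_ofList _)
    have hdecomp : PySem.List.sorted (PySem.Set.ofList (x :: xs)) (fun x => x)
        = x :: PySem.List.sorted (PySem.Set.ofList rest) (fun x => x) := by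
      apply PySem.List.sorted_eq_of_perm_of_pairwise_lt
      · apply (List.perm_ext_iff_of_nodup ?_ (PySem.Set.nodup_ofList _)).mpr
        · intro y
          simp only [List.mem_cons, hmem_sr, PySem.Set.mem_ofList, ← hxs, List.mem_append]
          constructor
          · rintro (rfl | hy)
            · exact Or.inl rfl
            · exact Or.inr (Or.inr hy)
          · rintro (rfl | hy | hy)
            · exact Or.inl rfl
            · exact Or.inl (hrun_eq y hy)
            · exact Or.inr hy
        · exact List.nodup_cons.mpr ⟨fun hx' => hx_notin ((hmem_sr x).mp hx'), hnodup_sr⟩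
      · apply List.pairwise_cons.mpr
        refine ⟨?_, hsortrest⟩
        intro y hy
        have hyr : y ∈ rest := (hmem_sr y).mp hy
        exact lt_of_le_of_ne (hx_le_rest y hyr) (fun e => hx_notin (e ▸ hyr))
    rw [groupRuns, hdecomp, List.map_cons, ih hrest_pw]
    congr 1
    · rw [← hrun, hcount_x]
    · apply List.map_congr_left
      intro k hk
      have hck : (x :: xs).count k = rest.count k := hcount_rest k ((hmem_sr k).mp hk)
      simp [hck]

set_option maxHeartbeats 4000000 in
set_option maxRecDepth 100000 in
theorem join_shape (t : String) (rs : List String) :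
    PySem.Str.join "\n" ("## <span id='1-summary'>1. Summary</span>\n"
        :: ("**Total Issues: " ++ t ++ "**\n")
        :: "### <span id='category-summary'>Issues by Category</span>\n"
        :: "| Category | Count |" :: "|----------|------:|" :: (rs ++ [""]))
      = "## <span id='1-summary'>1. Summary</span>\n\n**Total Issues: " ++ t
          ++ "**\n\n### <span id='category-summary'>Issues by Category</span>\n\n| Category | Count |\n|----------|------:|\n"
          ++ PySem.Str.join "" (rs.map (· ++ "\n")) := by
  apply String.toList_inj.mp
  simp only [pysem, List.map_cons, List.map_append, List.map_map, String.toList_append]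
  have hmap : (rs.map (· ++ "\n")).map String.toList = (rs.map String.toList).map (· ++ ['\n']) := by
    simp [List.map_map]
  rw [show ("\n".toList : List Char) = ['\n'] from rfl, show ("".toList : List Char) = [] from rfl]
  simp only [List.map_nil]
  rw [← List.cons_append, chars_join_aux]
  rw [show (String.toList ∘ fun x => x ++ "\n") = (fun x => String.toList (x ++ "\n")) from rfl]
  simp only [List.map_cons, join_nil_cons, String.toList_append]
  simp only [List.map_map]
  rw [show ((fun x => x ++ ['\n']) ∘ String.toList) = (fun (x : String) => x.toList ++ ['\n']) from rfl]
  simp only [List.append_assoc]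
  rfl

theorem row_newline (k t : String) :
    ("| " ++ k ++ " | " ++ t ++ " |") ++ "\n" = "| " ++ k ++ " | " ++ t ++ " |\n" := by
  apply String.toList_inj.mp
  simp only [String.toList_append, List.append_assoc]
  rfl

theorem generate_summary_section_spec' (issues : List (List (String × String))) :
    generate_summary_section issues = generate_summary_section_alt issues := by
  unfold generate_summary_section generate_summary_section_alt
  simp only [List.nil_append]
  set nms := issues.map (fun i => get_category_display_name (pvRawCat i)) with hnms
  have hfold : issues.foldl (fun d issue =>
      let cat := get_category_display_name (pvRawCat issue)
      d.insert cat (d.getD cat 0 + 1)) PySem.Dict.empty = PySem.Dict.counter nms := by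
    rw [hnms, ← PySem.Dict.foldl_insert_getD_add_one_eq_counter, List.foldl_map]
  rw [hfold, PySem.Dict.keys_counter]
  rw [PySem.List.foldl_append_singleton_eq_map]
  simp only [PySem.Dict.getD_counter]
  simp only [List.cons_append, List.nil_append]
  rw [join_shape]
  have hpw : (PySem.List.sorted nms (fun x => x)).Pairwise (· ≤ ·) := by
    simpa using PySem.List.sorted_pairwise nms (fun x => x)
  rw [groupRuns_sorted _ hpw]
  have hsets : PySem.List.sorted (PySem.Set.ofList (PySem.List.sorted nms (fun x => x))) (fun x => x)
      = PySem.List.sorted (PySem.Set.ofList nms) (fun x => x) := by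
    apply PySem.List.sorted_eq_sorted_of_perm _ _ _ (fun a b h => h)
    apply (List.perm_ext_iff_of_nodup (PySem.Set.nodup_ofList _) (PySem.Set.nodup_ofList _)).mpr
    intro y
    rw [PySem.Set.mem_ofList, PySem.Set.mem_ofList, PySem.List.mem_sorted]
  rw [hsets, List.map_map, List.map_map]
  congr 1
  congr 1
  apply List.map_congr_left
  intro k hk
  have hc : (PySem.List.sorted nms (fun x => x)).count k = nms.count k :=
    (PySem.List.sorted_perm nms (fun x => x) false).count_eq k
  simp only [Function.comp, hc, row_newline]

-- ===== VERDICT (by name: the statement is the Claim_ definition above) =====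
theorem generate_summary_section_spec : Claim_equal_generate_summary_section := by
  intro issues _
  unfold Spec_generate_summary_section
  exact generate_summary_section_spec' issues
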